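-- pv_equiv track=rewrite | github.com/dbsexomes/DBSpaper | metrics/normalize.py | right_trim
-- ===== SOURCE A (Python) =====
-- def right_trim(r, a):
--     """Given two strings `r` and `a` remove any common suffix
--     between the characters
--
--     >>> right_trim('AGCT', 'ACAT')
--     ('AGC', 'ACA')
--     >>> right_trim('AGAT', 'ACAT')
--     ('AG', 'AC')
--     >>> right_trim('TGAT', 'AGAT')
--     ('T', 'A')
--     >>> right_trim('AGGA', 'AA')
--     ('AGG', 'A')
--     >>> right_trim('AGGA', 'A')
--     ('AGGA', 'A')
--     >>> right_trim('AA', 'AGGA')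
--     ('A', 'AGG')
--     >>> right_trim('A', 'T')
--     ('A', 'T')
--     """
--     while r[-1] == a[-1]:
--         if len(r) > 1 and len(a) > 1:
--             r = r[:-1]
--             a = a[:-1]
--         else:
--             break
--     return r, a
-- ===== SOURCE B (Python) =====
-- def right_trim(r, a):
--     """Remove the common suffix of r and a, keeping at least one char of each:
--     one backward scan counts the trimmable suffix length, then slice once."""
--     n = 0
--     m = min(len(r), len(a)) - 1
--     while n < m and r[len(r) - 1 - n] == a[len(a) - 1 - n]:
--         n += 1
--     return r[:len(r) - n], a[:len(a) - n]
-- ===== Notes on version B (the rewrite author's own statement) =====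
-- stated objective: alternative
-- what changed: Instead of repeatedly rebuilding both strings with r[:-1]/a[:-1] in a loop, B counts the trimmable common-suffix length (capped so at least one char of each remains) in one backward index scan and slices each string once.
-- crash fix: A raises IndexError when r or a is the empty string (r[-1]/a[-1]); B returns (r, a) unchanged there. — e.g. on right_trim("", "A"): A raises IndexError, B returns ("", "A")
import Mathlib
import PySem

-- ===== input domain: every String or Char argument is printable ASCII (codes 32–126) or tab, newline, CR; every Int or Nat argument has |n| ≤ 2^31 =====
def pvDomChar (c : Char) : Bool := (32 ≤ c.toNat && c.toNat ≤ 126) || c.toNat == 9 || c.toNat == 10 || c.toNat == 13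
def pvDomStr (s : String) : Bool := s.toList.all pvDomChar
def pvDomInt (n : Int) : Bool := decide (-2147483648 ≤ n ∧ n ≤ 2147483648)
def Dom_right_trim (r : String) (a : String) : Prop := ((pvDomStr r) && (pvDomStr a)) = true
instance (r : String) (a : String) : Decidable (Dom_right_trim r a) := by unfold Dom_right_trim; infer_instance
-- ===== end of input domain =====

-- B replaces A's quadratic trim-one-char-at-a-time loop by a single backward scan
-- counting the trimmable common-suffix length, then one slice per string.
-- A raises IndexError on an empty r or a; Pre_ excludes those, B returns (r, a) there.


-- ===== PORT A =====
-- A's while loop: compare the last characters, and while equal and both strings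
-- longer than 1, drop the last character of each (r[:-1] / a[:-1]).
def rtLoopA (r a : List Char) : List Char × List Char :=
  if h : r ≠ [] ∧ a ≠ [] then
    if r.getLast h.1 = a.getLast h.2 then
      if h2 : 1 < r.length ∧ 1 < a.length then
        rtLoopA r.dropLast a.dropLast
      else (r, a)
    else (r, a)
  else (r, a)   -- Python raises IndexError here; excluded by Pre_right_trim
termination_by r.length
decreasing_by simp [List.length_dropLast]; omega

def right_trim (r : String) (a : String) : String × String :=
  let p := rtLoopA r.toList a.toList
  (String.mk p.1, String.mk p.2)

-- ===== PORT B =====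
-- B's backward scan: count matching characters from the end while n < m
-- (m = min(len r, len a) - 1); walking the reversed lists with the cap m.
def rtCount : List Char → List Char → Nat → Nat
  | c :: cs, d :: ds, m + 1 => if c = d then rtCount cs ds m + 1 else 0
  | _, _, _ => 0

def right_trim_alt (r : String) (a : String) : String × String :=
  let rl := r.toList
  let al := a.toList
  let n := rtCount rl.reverse al.reverse (min rl.length al.length - 1)
  (String.mk (rl.take (rl.length - n)), String.mk (al.take (al.length - n)))

-- ===== PRECONDITION & SPEC =====
-- Pre_ excludes exactly the inputs on which Python A raises IndexError (empty string).
def Pre_right_trim (r : String) (a : String) : Prop := r ≠ "" ∧ a ≠ ""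
instance (r : String) (a : String) : Decidable (Pre_right_trim r a) := by
  unfold Pre_right_trim; infer_instance

def pvWitness_right_trim : String × String := ("AGCT", "ACAT")

-- A raises IndexError when r or a is the empty string (r[-1]/a[-1]); B returns (r, a) unchanged there.
def Raises_right_trim (r : String) (a : String) : Prop := r = "" ∨ a = ""
instance (r : String) (a : String) : Decidable (Raises_right_trim r a) := by
  unfold Raises_right_trim; infer_instance
def pvRaiseWitness_right_trim : String × String := ("", "A")
def pvRaiseWitnessOut_right_trim : String × String := ("", "A")

def Spec_right_trim (r : String) (a : String) (out : String × String) : Prop :=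
  out = right_trim_alt r a
instance (r : String) (a : String) (out : String × String) : Decidable (Spec_right_trim r a out) := by
  unfold Spec_right_trim; infer_instance

-- ===== CLAIM (what is proved, stated in full; the proofs are below) =====
def Claim_equal_right_trim : Prop := ∀ (r : String) (a : String),
  Dom_right_trim r a → Pre_right_trim r a → Spec_right_trim r a (right_trim r a)

def Claim_raises_right_trim : Prop :=
  (∀ (r : String) (a : String), Dom_right_trim r a → Raises_right_trim r a → ¬ Pre_right_trim r a) ∧
  (Dom_right_trim (pvRaiseWitness_right_trim.1) (pvRaiseWitness_right_trim.2) ∧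
   Raises_right_trim (pvRaiseWitness_right_trim.1) (pvRaiseWitness_right_trim.2) ∧
   right_trim_alt (pvRaiseWitness_right_trim.1) (pvRaiseWitness_right_trim.2) = pvRaiseWitnessOut_right_trim)

-- ===== LEMMAS AND PROOFS =====

-- The loop of A computes exactly B's "count capped suffix, then slice once".
theorem rtLoopA_eq (r a : List Char) :
    rtLoopA r a =
      (r.take (r.length - rtCount r.reverse a.reverse (min r.length a.length - 1)),
       a.take (a.length - rtCount r.reverse a.reverse (min r.length a.length - 1))) := by
  induction r, a using rtLoopA.induct with
  | case1 r a h heq h2 ih =>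
      rw [rtLoopA]
      simp only [dif_pos h, if_pos heq, dif_pos h2]
      rw [ih]
      obtain ⟨hr, ha⟩ := h
      have hrc : r.dropLast ++ [r.getLast hr] = r := List.dropLast_append_getLast hr
      have hac : a.dropLast ++ [a.getLast ha] = a := List.dropLast_append_getLast ha
      have hrrev : r.reverse = r.getLast hr :: r.dropLast.reverse := by
        conv_lhs => rw [← hrc]
        simp
      have harev : a.reverse = a.getLast ha :: a.dropLast.reverse := by
        conv_lhs => rw [← hac]
        simp
      have hrl : r.length = r.dropLast.length + 1 := by
        conv_lhs => rw [← hrc]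
        simp
      have hal : a.length = a.dropLast.length + 1 := by
        conv_lhs => rw [← hac]
        simp
      have hcap : min r.length a.length - 1 =
          (min r.dropLast.length a.dropLast.length - 1) + 1 := by omega
      rw [hrrev, harev, hcap, rtCount, if_pos heq]
      set k := rtCount r.dropLast.reverse a.dropLast.reverse
        (min r.dropLast.length a.dropLast.length - 1) with hk
      simp only [Prod.mk.injEq]
      constructor
      · have : r.length - (k + 1) = r.dropLast.length - k := by omega
        rw [this]
        conv_rhs => rw [← hrc]
        rw [List.take_append]
        simp
      · have : a.length - (k + 1) = a.dropLast.length - k := by omega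
        rw [this]
        conv_rhs => rw [← hac]
        rw [List.take_append]
        simp
  | case2 r a h heq h2 =>
      rw [rtLoopA]
      simp only [dif_pos h, if_pos heq, dif_neg h2]
      obtain ⟨hr, ha⟩ := h
      have h1 : 1 ≤ r.length := List.length_pos_of_ne_nil hr
      have h1' : 1 ≤ a.length := List.length_pos_of_ne_nil ha
      have hcap : min r.length a.length - 1 = 0 := by
        simp only [not_and_or, not_lt] at h2
        omega
      have hc : rtCount r.reverse a.reverse (min r.length a.length - 1) = 0 := by
        rw [hcap]
        rcases r.reverse with _ | ⟨c, cs⟩ <;> rcases a.reverse with _ | ⟨d, ds⟩ <;> rfl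
      simp [hc]
  | case3 r a h heq =>
      rw [rtLoopA]
      simp only [dif_pos h, if_neg heq]
      obtain ⟨hr, ha⟩ := h
      have hrc : r.dropLast ++ [r.getLast hr] = r := List.dropLast_append_getLast hr
      have hac : a.dropLast ++ [a.getLast ha] = a := List.dropLast_append_getLast ha
      have hrrev : r.reverse = r.getLast hr :: r.dropLast.reverse := by
        conv_lhs => rw [← hrc]; simp
      have harev : a.reverse = a.getLast ha :: a.dropLast.reverse := by
        conv_lhs => rw [← hac]; simp
      have hc : rtCount r.reverse a.reverse (min r.length a.length - 1) = 0 := by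
        rw [hrrev, harev]
        cases hm : min r.length a.length - 1 with
        | zero => rfl
        | succ m => rw [rtCount, if_neg heq]
      simp [hc]
  | case4 r a h =>
      rw [rtLoopA]
      simp only [dif_neg h]
      have hc : rtCount r.reverse a.reverse (min r.length a.length - 1) = 0 := by
        rw [not_and_or] at h
        rcases h with h | h <;> simp at h <;> subst h
        · rfl
        · rcases r.reverse with _ | ⟨c, cs⟩ <;> rfl
      simp [hc]

-- ===== VERDICT (by name: the statement is the Claim_ definition above) =====
theorem right_trim_spec : Claim_equal_right_trim := by
  intro r a _ _
  unfold Spec_right_trim right_trim right_trim_alt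
  rw [rtLoopA_eq]

theorem right_trim_raises : Claim_raises_right_trim := by
  unfold Claim_raises_right_trim
  constructor
  · intro r a _ hra hpre
    rcases hra with h | h
    · exact hpre.1 h
    · exact hpre.2 h
  · exact ⟨by decide, by decide, by decide⟩

-- self-check: the raise witness really lies in the stated raise region
theorem pvRaiseWitness_ok :
    Raises_right_trim pvRaiseWitness_right_trim.1 pvRaiseWitness_right_trim.2 :=
  right_trim_raises.2.2.1
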